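-- pv_equiv track=rewrite | github.com/thanhan910/MATA-AND-OR | andortree/AOGNE.py | simplify_tree_info
-- ===== SOURCE A (Python) =====
-- def simplify_tree_info(children_info : dict[int, list[int]], leaves_info : dict[int, list[int]] = {}, root_node_id: int=0):
--     new_children_info = {}
--     new_leaves_info = {}
--     stack = [0]
--     while len(stack) > 0:
--         current_node = stack.pop()
--         if current_node in children_info and len(children_info[current_node]) > 0:
--             new_children_info[current_node] = children_info[current_node].copy()
--         if current_node in leaves_info and len(leaves_info[current_node]) > 0:
--             new_leaves_info[current_node] = leaves_info[current_node].copy()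
--         stack += children_info[current_node]
--     return new_children_info, new_leaves_info
-- ===== SOURCE B (Python) =====
-- def simplify_tree_info(children_info: dict[int, list[int]], leaves_info: dict[int, list[int]] = {}, root_node_id: int = 0):
--     new_children_info = {}
--     new_leaves_info = {}
--     done = set()
--
--     def visit(node):
--         if node in done:
--             return
--         children = children_info[node]
--         if children:
--             new_children_info[node] = list(children)
--         leaves = leaves_info.get(node)
--         if leaves:
--             new_leaves_info[node] = list(leaves)
--         for child in reversed(children):
--             visit(child)
--         done.add(node)
--
--     visit(0)
--     return new_children_info, new_leaves_info
-- ===== Notes on version B (the rewrite author's own statement) =====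
-- stated objective: alternative
-- what changed: A's explicit-stack loop re-traverses a node's whole subtree every time the node is reached again; B is a memoized recursive DFS with a visited set, so each reachable node is processed exactly once.
import Mathlib
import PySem

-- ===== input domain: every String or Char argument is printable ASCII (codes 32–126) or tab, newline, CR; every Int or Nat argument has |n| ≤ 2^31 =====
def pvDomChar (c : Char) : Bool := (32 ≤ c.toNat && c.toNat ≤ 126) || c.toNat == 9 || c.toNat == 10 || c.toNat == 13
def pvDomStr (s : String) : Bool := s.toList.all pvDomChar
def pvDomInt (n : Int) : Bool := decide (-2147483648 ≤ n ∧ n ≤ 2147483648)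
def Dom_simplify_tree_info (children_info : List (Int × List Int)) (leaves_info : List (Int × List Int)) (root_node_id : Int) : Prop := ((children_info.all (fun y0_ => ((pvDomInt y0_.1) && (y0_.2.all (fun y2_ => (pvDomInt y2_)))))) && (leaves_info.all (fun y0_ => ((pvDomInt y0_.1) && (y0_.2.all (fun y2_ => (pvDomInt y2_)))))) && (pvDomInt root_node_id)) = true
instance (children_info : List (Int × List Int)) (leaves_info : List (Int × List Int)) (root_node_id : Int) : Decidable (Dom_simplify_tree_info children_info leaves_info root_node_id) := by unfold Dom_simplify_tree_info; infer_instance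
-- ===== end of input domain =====

-- B replaces A's explicit-stack loop (which re-traverses a shared subtree at every
-- re-encounter) by a memoized recursive DFS with a visited set, so each node is
-- processed once; equivalence is proved on Pre_ (the inputs where A terminates
-- without a KeyError).

-- state carried by both traversals: (new_children_info, new_leaves_info)
abbrev PvSt := PySem.Dict Int (List Int) × PySem.Dict Int (List Int)

-- ===== PORT A =====
-- fuel bound for A's while-loop (proof-only totality guard: counts 1 + the pop counts of the
-- children up to depth d; on inputs satisfying Pre_ it dominates the loop's total pop count)
def pvW (cd : PySem.Dict Int (List Int)) : Nat → Int → Nat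
  | 0, _ => 1
  | d+1, n => 1 + ((cd.get? n).getD []).reverse.foldl (fun a c => a + pvW cd d c) 0

-- A's while-loop. The stack is kept REVERSED: Python pops from the END, so the head here is
-- Python's last element and `stack += cs` prepends cs.reverse. Fuel only makes the loop total;
-- `none` = KeyError at `children_info[current_node]` or fuel exhausted (both outside Pre_).
def pvRunA (cd ld : PySem.Dict Int (List Int)) : Nat → List Int → PvSt → Option (PvSt × Nat)
  | f, [], st => some (st, f)
  | 0, _ :: _, _ => none
  | f+1, n :: rstack, (nc, nl) =>
    let nc := match cd.get? n with
      | some cs => if cs.length > 0 then nc.insert n cs else nc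
      | none => nc
    let nl := match ld.get? n with
      | some ls => if ls.length > 0 then nl.insert n ls else nl
      | none => nl
    match cd.get? n with
    | none => none
    | some cs => pvRunA cd ld f (cs.reverse ++ rstack) (nc, nl)

def simplify_tree_info (children_info : List (Int × List Int)) (leaves_info : List (Int × List Int)) (root_node_id : Int) : (List (Int × List Int)) × (List (Int × List Int)) :=
  let cd := PySem.Dict.mk children_info
  let ld := PySem.Dict.mk leaves_info
  match pvRunA cd ld (pvW cd (children_info.length + 1) 0) [0] (PySem.Dict.mk [], PySem.Dict.mk []) with
  | some ((nc, nl), _) => (nc.items, nl.items)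
  | none => ([], [])   -- unreachable under Pre_

-- ===== PORT B =====
-- B's memoized visit: `if node in done: return`, copy the node's info, recurse on the
-- children in reverse, then `done.add(node)`. Depth fuel is the totality guard only
-- (Pre_ bounds the recursion depth by children_info.length + 1); `none` = KeyError /
-- fuel exhausted, both outside Pre_.
def pvVisitM (cd ld : PySem.Dict Int (List Int)) : Nat → Int → (PySem.Set Int × PvSt) → Option (PySem.Set Int × PvSt)
  | 0, _, _ => none
  | f+1, n, (V, (nc, nl)) =>
    if PySem.Set.contains V n then some (V, (nc, nl))
    else
      match cd.get? n with
      | none => none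
      | some cs =>
        let nc := if cs ≠ [] then nc.insert n cs else nc
        let nl := match ld.get? n with
          | some ls => if ls ≠ [] then nl.insert n ls else nl
          | none => nl
        (cs.reverse.foldlM (fun p c => pvVisitM cd ld f c p) (V, (nc, nl))).map
          (fun p => (PySem.Set.add p.1 n, p.2))

def simplify_tree_info_alt (children_info : List (Int × List Int)) (leaves_info : List (Int × List Int)) (root_node_id : Int) : (List (Int × List Int)) × (List (Int × List Int)) :=
  let cd := PySem.Dict.mk children_info
  let ld := PySem.Dict.mk leaves_info
  match pvVisitM cd ld (children_info.length + 1) 0 (PySem.Set.empty, (PySem.Dict.mk [], PySem.Dict.mk [])) with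
  | some (_, (nc, nl)) => (nc.items, nl.items)
  | none => ([], [])   -- unreachable under Pre_

-- ===== PRECONDITION & SPEC =====
-- graph vocabulary for Pre_: children of a node, one expansion step, its iteration, the
-- saturated reachable set (iterating |universe| times reaches a fixed point)
def pvChildren (cd : PySem.Dict Int (List Int)) (n : Int) : List Int := (cd.get? n).getD []
def pvStep (cd : PySem.Dict Int (List Int)) (S : List Int) : List Int :=
  PySem.List.dedup (S ++ S.flatMap (pvChildren cd))
def pvIter (cd : PySem.Dict Int (List Int)) : Nat → List Int → List Int
  | 0, S => S
  | k+1, S => pvStep cd (pvIter cd k S)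
def pvU (cd : PySem.Dict Int (List Int)) : List Int := 0 :: (cd.keys ++ cd.values.flatten)
def pvReach (cd : PySem.Dict Int (List Int)) (x : Int) : List Int := pvIter cd (pvU cd).length [x]

-- Pre_: A returns normally exactly when every node reachable from 0 is a key of children_info
-- (else KeyError) and no reachable node lies on a cycle (else the while-loop never ends).
def Pre_simplify_tree_info (children_info : List (Int × List Int)) (leaves_info : List (Int × List Int)) (root_node_id : Int) : Prop :=
  (∀ n ∈ pvReach (PySem.Dict.mk children_info) 0, ((PySem.Dict.mk children_info).get? n).isSome = true) ∧
  (∀ n ∈ pvReach (PySem.Dict.mk children_info) 0, ∀ c ∈ pvChildren (PySem.Dict.mk children_info) n,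
      n ∉ pvReach (PySem.Dict.mk children_info) c)
instance (children_info : List (Int × List Int)) (leaves_info : List (Int × List Int)) (root_node_id : Int) : Decidable (Pre_simplify_tree_info children_info leaves_info root_node_id) := by unfold Pre_simplify_tree_info; infer_instance

def pvWitness_simplify_tree_info : (List (Int × List Int)) × (List (Int × List Int)) × Int :=
  ([(0, [1, 2]), (1, []), (2, [])], [(1, [7])], 0)

def Spec_simplify_tree_info (children_info : List (Int × List Int)) (leaves_info : List (Int × List Int)) (root_node_id : Int) (out : (List (Int × List Int)) × (List (Int × List Int))) : Prop := out = simplify_tree_info_alt children_info leaves_info root_node_id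
instance (children_info : List (Int × List Int)) (leaves_info : List (Int × List Int)) (root_node_id : Int) (out : (List (Int × List Int)) × (List (Int × List Int))) : Decidable (Spec_simplify_tree_info children_info leaves_info root_node_id out) := by unfold Spec_simplify_tree_info; infer_instance

-- ===== CLAIM (what is proved, stated in full; the proofs are below) =====
def Claim_equal_simplify_tree_info : Prop := ∀ (children_info : List (Int × List Int)) (leaves_info : List (Int × List Int)) (root_node_id : Int), Dom_simplify_tree_info children_info leaves_info root_node_id → Pre_simplify_tree_info children_info leaves_info root_node_id → Spec_simplify_tree_info children_info leaves_info root_node_id (simplify_tree_info children_info leaves_info root_node_id)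

-- ===== LEMMAS AND PROOFS =====

theorem pvWitness_ok : Pre_simplify_tree_info pvWitness_simplify_tree_info.1 pvWitness_simplify_tree_info.2.1 pvWitness_simplify_tree_info.2.2 ∧ Dom_simplify_tree_info pvWitness_simplify_tree_info.1 pvWitness_simplify_tree_info.2.1 pvWitness_simplify_tree_info.2.2 := by
  constructor <;> decide

-- proof-only intermediate: A's traversal in recursive form (no memoization); it bridges
-- A's stack loop (pvK below) with B's memoized DFS (pvBisim below)
def pvVisitR (cd ld : PySem.Dict Int (List Int)) : Nat → Int → PvSt → Option PvSt
  | 0, _, _ => none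
  | f+1, n, (nc, nl) =>
    match cd.get? n with
    | none => none
    | some cs =>
      let nc := if cs ≠ [] then nc.insert n cs else nc
      let nl := match ld.get? n with
        | some ls => if ls ≠ [] then nl.insert n ls else nl
        | none => nl
      cs.reverse.foldlM (fun st c => pvVisitR cd ld f c st) (nc, nl)

-- --- A-side loop lemmas ---

theorem pvRunA_nil (cd ld : PySem.Dict Int (List Int)) (f : Nat) (st : PvSt) :
    pvRunA cd ld f [] st = some (st, f) := by
  cases f <;> rfl

theorem pvRunA_mono (cd ld : PySem.Dict Int (List Int)) :
    ∀ (f : Nat) (l : List Int) (st st' : PvSt) (f' k : Nat),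
      pvRunA cd ld f l st = some (st', f') → pvRunA cd ld (f + k) l st = some (st', f' + k) := by
  intro f
  induction f with
  | zero =>
    intro l st st' f' k h
    cases l with
    | nil => simp [pvRunA_nil] at h ⊢; exact ⟨h.1, h.2.symm⟩
    | cons n r => simp [pvRunA] at h
  | succ f ih =>
    intro l st st' f' k h
    cases l with
    | nil =>
      rw [pvRunA_nil] at h
      cases h
      simp [pvRunA_nil]
    | cons n r =>
      obtain ⟨nc, nl⟩ := st
      rw [show f + 1 + k = (f + k) + 1 by omega]
      simp only [pvRunA] at h ⊢
      cases hg : cd.get? n with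
      | none => rw [hg] at h; simp at h
      | some cs =>
        rw [hg] at h
        simp only at h ⊢
        exact ih _ _ _ _ k h

theorem pvRunA_split (cd ld : PySem.Dict Int (List Int)) :
    ∀ (f : Nat) (l rest : List Int) (st : PvSt),
      pvRunA cd ld f (l ++ rest) st
        = (pvRunA cd ld f l st).bind (fun p => pvRunA cd ld p.2 rest p.1) := by
  intro f
  induction f with
  | zero =>
    intro l rest st
    cases l with
    | nil => simp [pvRunA_nil]
    | cons n r => simp [pvRunA]
  | succ f ih =>
    intro l rest st
    cases l with
    | nil => simp [pvRunA_nil]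
    | cons n r =>
      obtain ⟨nc, nl⟩ := st
      simp only [List.cons_append, pvRunA]
      cases hg : cd.get? n with
      | none => simp
      | some cs =>
        simp only
        rw [show cs.reverse ++ (r ++ rest) = (cs.reverse ++ r) ++ rest from (List.append_assoc _ _ _).symm]
        exact ih _ _ _

-- --- recursive ⇒ stack-loop simulation: a successful pvVisitR run is matched by A's loop ---

theorem pv_foldl_add (cd : PySem.Dict Int (List Int)) (d : Nat) :
    ∀ (l : List Int) (a : Nat), l.foldl (fun a c => a + pvW cd d c) a = a + (l.map (pvW cd d)).sum := by
  intro l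
  induction l with
  | nil => simp
  | cons x l ih => intro a; simp [List.foldl_cons, ih]; omega

theorem pvKL (cd ld : PySem.Dict Int (List Int)) (d : Nat)
    (hK : ∀ (n : Int) (st out : PvSt), pvVisitR cd ld d n st = some out →
      ∃ c, c ≤ pvW cd d n ∧ pvRunA cd ld c [n] st = some (out, 0)) :
    ∀ (l : List Int) (st out : PvSt),
      List.foldlM (fun st c => pvVisitR cd ld d c st) st l = some out →
      ∃ c, c ≤ (l.map (pvW cd d)).sum ∧ pvRunA cd ld c l st = some (out, 0) := by
  intro l
  induction l with
  | nil =>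
    intro st out h
    simp [List.foldlM] at h
    exact ⟨0, by simp, by rw [pvRunA_nil, h]⟩
  | cons n l ih =>
    intro st out h
    rw [List.foldlM_cons] at h
    cases hv : pvVisitR cd ld d n st with
    | none => rw [hv] at h; simp at h
    | some st1 =>
      rw [hv] at h; try simp only [Option.bind_some] at h
      obtain ⟨c1, hc1, hr1⟩ := hK n st st1 hv
      obtain ⟨c2, hc2, hr2⟩ := ih st1 out h
      refine ⟨c1 + c2, by simp only [List.map_cons, List.sum_cons]; omega, ?_⟩
      have : (n :: l) = [n] ++ l := rfl
      rw [this, pvRunA_split, pvRunA_mono cd ld c1 [n] st st1 0 c2 hr1]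
      simpa using hr2

theorem pvK (cd ld : PySem.Dict Int (List Int)) :
    ∀ (d : Nat) (n : Int) (st out : PvSt),
      pvVisitR cd ld d n st = some out →
      ∃ c, c ≤ pvW cd d n ∧ pvRunA cd ld c [n] st = some (out, 0) := by
  intro d
  induction d with
  | zero => intro n st out h; simp [pvVisitR] at h
  | succ d ih =>
    intro n st out h
    obtain ⟨nc, nl⟩ := st
    simp only [pvVisitR] at h
    cases hg : cd.get? n with
    | none => rw [hg] at h; simp at h
    | some cs =>
      rw [hg] at h; simp only at h
      obtain ⟨c, hc, hrun⟩ := pvKL cd ld d ih cs.reverse _ _ h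
      refine ⟨c + 1, ?_, ?_⟩
      · have hb : pvW cd (d+1) n = 1 + (cs.reverse.map (pvW cd d)).sum := by
          show 1 + ((cd.get? n).getD []).reverse.foldl (fun a c => a + pvW cd d c) 0 = _
          rw [hg, Option.getD_some, pv_foldl_add]
          omega
        omega
      · simp only [pvRunA]
        rw [hg]
        simp only [List.append_nil]
        have hnc : (if cs.length > 0 then nc.insert n cs else nc) = (if cs ≠ [] then nc.insert n cs else nc) := by
          cases cs <;> simp
        have hnl : (match ld.get? n with
            | some ls => if ls.length > 0 then nl.insert n ls else nl
            | none => nl) = (match ld.get? n with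
            | some ls => if ls ≠ [] then nl.insert n ls else nl
            | none => nl) := by
          cases ld.get? n with
          | none => rfl
          | some ls => cases ls <;> simp
        rw [hnc, hnl]
        exact hrun

-- --- graph lemmas ---

theorem pv_mem_step_iff (cd : PySem.Dict Int (List Int)) (S : List Int) (y : Int) :
    y ∈ pvStep cd S ↔ y ∈ S ∨ ∃ n ∈ S, y ∈ pvChildren cd n := by
  simp [pvStep, List.mem_append, List.mem_flatMap]

theorem pv_step_mono (cd : PySem.Dict Int (List Int)) {S T : List Int}
    (h : ∀ x ∈ S, x ∈ T) : ∀ y ∈ pvStep cd S, y ∈ pvStep cd T := by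
  intro y hy
  rw [pv_mem_step_iff] at *
  rcases hy with hy | ⟨n, hn, hc⟩
  · exact Or.inl (h _ hy)
  · exact Or.inr ⟨n, h _ hn, hc⟩

theorem pv_mem_iter (cd : PySem.Dict Int (List Int)) :
    ∀ (k : Nat) (S : List Int) (x : Int), x ∈ S → x ∈ pvIter cd k S := by
  intro k
  induction k with
  | zero => intro S x h; exact h
  | succ k ih =>
    intro S x h
    exact (pv_mem_step_iff cd _ x).2 (Or.inl (ih S x h))

theorem pv_children_sub_U (cd : PySem.Dict Int (List Int)) (n c : Int)
    (h : c ∈ pvChildren cd n) : c ∈ pvU cd := by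
  unfold pvChildren at h
  cases hg : cd.get? n with
  | none => rw [hg] at h; simp at h
  | some cs =>
    rw [hg, Option.getD_some] at h
    have hm := PySem.Dict.mem_items_of_get?_eq_some (d := cd) hg
    have : cs ∈ cd.values := by
      simp only [PySem.Dict.values]
      exact List.mem_map.2 ⟨(n, cs), hm, rfl⟩
    simp only [pvU, List.mem_cons, List.mem_append]
    exact Or.inr (Or.inr (List.mem_flatten.2 ⟨cs, this, h⟩))

theorem pv_iter_sub_U (cd : PySem.Dict Int (List Int)) (x : Int) (hx : x ∈ pvU cd) :
    ∀ k, ∀ y ∈ pvIter cd k [x], y ∈ pvU cd := by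
  intro k
  induction k with
  | zero => intro y hy; simp [pvIter] at hy; simpa [hy] using hx
  | succ k ih =>
    intro y hy
    rcases (pv_mem_step_iff cd _ y).1 hy with h | ⟨m, _, hc⟩
    · exact ih y h
    · exact pv_children_sub_U cd m y hc

theorem pv_stable_ge (cd : PySem.Dict Int (List Int)) (x : Int) (j : Nat)
    (h : ∀ y ∈ pvStep cd (pvIter cd j [x]), y ∈ pvIter cd j [x]) :
    ∀ m, ∀ y ∈ pvStep cd (pvIter cd (j + m) [x]), y ∈ pvIter cd (j + m) [x] := by
  intro m
  induction m with
  | zero => exact h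
  | succ m ih =>
    have : j + (m + 1) = (j + m) + 1 := by omega
    rw [this]
    exact pv_step_mono cd ih

theorem pv_grow (cd : PySem.Dict Int (List Int)) (x : Int) :
    ∀ k, (∀ j < k, ¬ (∀ y ∈ pvStep cd (pvIter cd j [x]), y ∈ pvIter cd j [x])) →
      k + 1 ≤ (pvIter cd k [x]).toFinset.card := by
  intro k
  induction k with
  | zero => intro _; simp [pvIter]
  | succ k ih =>
    intro h
    have hk := ih (fun j hj => h j (by omega))
    have hnot := h k (by omega)
    push_neg at hnot
    obtain ⟨y, hy, hny⟩ := hnot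
    have hss : (pvIter cd k [x]).toFinset ⊂ (pvIter cd (k+1) [x]).toFinset := by
      constructor
      · intro z hz
        exact List.mem_toFinset.2 ((pv_mem_step_iff cd _ z).2 (Or.inl (List.mem_toFinset.1 hz)))
      · intro hcon
        exact hny (List.mem_toFinset.1 (hcon (List.mem_toFinset.2 hy)))
    have := Finset.card_lt_card hss
    omega

theorem pv_sat_closed (cd : PySem.Dict Int (List Int)) (x : Int) (hx : x ∈ pvU cd) :
    ∀ y ∈ pvStep cd (pvReach cd x), y ∈ pvReach cd x := by
  by_cases hex : ∃ j < (pvU cd).length, ∀ y ∈ pvStep cd (pvIter cd j [x]), y ∈ pvIter cd j [x]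
  · obtain ⟨j, hj, hst⟩ := hex
    have := pv_stable_ge cd x j hst ((pvU cd).length - j)
    rw [show j + ((pvU cd).length - j) = (pvU cd).length by omega] at this
    exact this
  · exfalso
    have h1 := pv_grow cd x (pvU cd).length (fun j hj hall => hex ⟨j, hj, hall⟩)
    have h2 : (pvIter cd (pvU cd).length [x]).toFinset ⊆ (pvU cd).toFinset := by
      intro z hz
      exact List.mem_toFinset.2 (pv_iter_sub_U cd x hx _ z (List.mem_toFinset.1 hz))
    have h3 := Finset.card_le_card h2
    have h4 := List.toFinset_card_le (pvU cd)
    omega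

theorem pv_reach_sub_reach (cd : PySem.Dict Int (List Int)) (x c : Int) (hx : x ∈ pvU cd)
    (hc : c ∈ pvReach cd x) : ∀ y ∈ pvReach cd c, y ∈ pvReach cd x := by
  have : ∀ k, ∀ y ∈ pvIter cd k [c], y ∈ pvReach cd x := by
    intro k
    induction k with
    | zero => intro y hy; simp [pvIter] at hy; simpa [hy] using hc
    | succ k ih =>
      intro y hy
      exact pv_sat_closed cd x hx y (pv_step_mono cd ih y hy)
  exact this _

theorem pv_self_mem_reach (cd : PySem.Dict Int (List Int)) (n : Int) : n ∈ pvReach cd n :=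
  pv_mem_iter cd _ [n] n (by simp)

theorem pv_child_mem_reach (cd : PySem.Dict Int (List Int)) (n c : Int)
    (h : c ∈ pvChildren cd n) : c ∈ pvReach cd n := by
  show c ∈ pvIter cd (pvU cd).length [n]
  have hlen : (pvU cd).length = ((pvU cd).length - 1) + 1 := by simp [pvU]
  rw [hlen]
  exact (pv_mem_step_iff cd _ c).2
    (Or.inr ⟨n, pv_mem_iter cd _ [n] n (by simp), h⟩)

theorem pv_reach_decomp (cd : PySem.Dict Int (List Int)) (n y : Int)
    (h : y ∈ pvReach cd n) : y = n ∨ ∃ c ∈ pvChildren cd n, y ∈ pvReach cd c := by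
  have key : ∀ k, ∀ y, y ∈ pvIter cd k [n] → y = n ∨ ∃ c ∈ pvChildren cd n, y ∈ pvReach cd c := by
    intro k
    induction k with
    | zero => intro y hy; left; simpa [pvIter] using hy
    | succ k ih =>
      intro y hy
      rcases (pv_mem_step_iff cd _ y).1 hy with h' | ⟨m, hm, hc⟩
      · exact ih y h'
      · rcases ih m hm with rfl | ⟨c, hcc, hmr⟩
        · exact Or.inr ⟨y, hc, pv_self_mem_reach cd y⟩
        · exact Or.inr ⟨c, hcc, pv_sat_closed cd c (pv_children_sub_U cd n c hcc) y
            ((pv_mem_step_iff cd _ y).2 (Or.inr ⟨m, hmr, hc⟩))⟩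
  exact key _ y h

-- --- termination of the recursive (non-memoized) traversal under Pre_ ---

theorem pvT (cd ld : PySem.Dict Int (List Int))
    (hclosed : ∀ n ∈ pvReach cd 0, (cd.get? n).isSome = true)
    (hacyc : ∀ n ∈ pvReach cd 0, ∀ c ∈ pvChildren cd n, n ∉ pvReach cd c) :
    ∀ (d : Nat) (n : Int) (st : PvSt), n ∈ pvReach cd 0 →
      (pvReach cd n).toFinset.card ≤ d → ∃ out, pvVisitR cd ld d n st = some out := by
  have h0U : (0 : Int) ∈ pvU cd := by simp [pvU]
  intro d
  induction d with
  | zero =>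
    intro n st hn hcard
    have hself : n ∈ pvReach cd n := pv_self_mem_reach cd n
    have : 0 < (pvReach cd n).toFinset.card :=
      Finset.card_pos.2 ⟨n, List.mem_toFinset.2 hself⟩
    omega
  | succ d ih =>
    intro n st hn hcard
    obtain ⟨nc, nl⟩ := st
    have hs := hclosed n hn
    cases hg : cd.get? n with
    | none => rw [hg] at hs; simp at hs
    | some cs =>
      have hnU : n ∈ pvU cd := pv_iter_sub_U cd 0 h0U _ n hn
      have hch : ∀ c ∈ cs, c ∈ pvChildren cd n := by
        intro c hc; simpa [pvChildren, hg] using hc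
      have hcR : ∀ c ∈ cs, c ∈ pvReach cd 0 := by
        intro c hc
        exact pv_sat_closed cd 0 h0U c
          ((pv_mem_step_iff cd _ c).2 (Or.inr ⟨n, hn, hch c hc⟩))
      have hcmu : ∀ c ∈ cs, (pvReach cd c).toFinset.card ≤ d := by
        intro c hc
        have hselfn : n ∈ pvReach cd n := pv_self_mem_reach cd n
        have hcrn : c ∈ pvReach cd n := pv_child_mem_reach cd n c (hch c hc)
        have hsub := pv_reach_sub_reach cd n c hnU hcrn
        have hnot : n ∉ pvReach cd c := hacyc n hn c (hch c hc)
        have hss : (pvReach cd c).toFinset ⊂ (pvReach cd n).toFinset := by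
          constructor
          · intro z hz
            exact List.mem_toFinset.2 (hsub z (List.mem_toFinset.1 hz))
          · intro hcon
            exact hnot (List.mem_toFinset.1 (hcon (List.mem_toFinset.2 hselfn)))
        have := Finset.card_lt_card hss
        omega
      have hfold : ∀ l : List Int, (∀ c ∈ l, c ∈ cs) → ∀ st : PvSt,
          ∃ out, List.foldlM (fun st c => pvVisitR cd ld d c st) st l = some out := by
        intro l
        induction l with
        | nil => intro _ st; exact ⟨st, rfl⟩
        | cons c l ihl =>
          intro hsubl st
          obtain ⟨st1, h1⟩ := ih c st (hcR c (hsubl c (by simp))) (hcmu c (hsubl c (by simp)))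
          obtain ⟨out, h2⟩ := ihl (fun c' hc' => hsubl c' (by simp [hc'])) st1
          refine ⟨out, ?_⟩
          rw [List.foldlM_cons, h1]
          simpa using h2
      obtain ⟨out, hout⟩ := hfold cs.reverse (fun c hc => List.mem_reverse.1 hc) _
      refine ⟨out, ?_⟩
      simp only [pvVisitR]
      rw [hg]
      exact hout

-- --- termination of B's memoized traversal under Pre_ ---

theorem pvTM (cd ld : PySem.Dict Int (List Int))
    (hclosed : ∀ n ∈ pvReach cd 0, (cd.get? n).isSome = true)
    (hacyc : ∀ n ∈ pvReach cd 0, ∀ c ∈ pvChildren cd n, n ∉ pvReach cd c) :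
    ∀ (d : Nat) (n : Int) (V : PySem.Set Int) (st : PvSt), n ∈ pvReach cd 0 →
      (pvReach cd n).toFinset.card ≤ d → ∃ out, pvVisitM cd ld d n (V, st) = some out := by
  have h0U : (0 : Int) ∈ pvU cd := by simp [pvU]
  intro d
  induction d with
  | zero =>
    intro n V st hn hcard
    have : 0 < (pvReach cd n).toFinset.card :=
      Finset.card_pos.2 ⟨n, List.mem_toFinset.2 (pv_self_mem_reach cd n)⟩
    omega
  | succ d ih =>
    intro n V st hn hcard
    obtain ⟨nc, nl⟩ := st
    cases hcV : PySem.Set.contains V n with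
    | true => exact ⟨(V, (nc, nl)), by simp only [pvVisitM, hcV]; rfl⟩
    | false =>
      have hs := hclosed n hn
      cases hg : cd.get? n with
      | none => rw [hg] at hs; simp at hs
      | some cs =>
        have hnU : n ∈ pvU cd := pv_iter_sub_U cd 0 h0U _ n hn
        have hch : ∀ c ∈ cs, c ∈ pvChildren cd n := by
          intro c hc; simpa [pvChildren, hg] using hc
        have hcR : ∀ c ∈ cs, c ∈ pvReach cd 0 := by
          intro c hc
          exact pv_sat_closed cd 0 h0U c
            ((pv_mem_step_iff cd _ c).2 (Or.inr ⟨n, hn, hch c hc⟩))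
        have hcmu : ∀ c ∈ cs, (pvReach cd c).toFinset.card ≤ d := by
          intro c hc
          have hcrn : c ∈ pvReach cd n := pv_child_mem_reach cd n c (hch c hc)
          have hsub := pv_reach_sub_reach cd n c hnU hcrn
          have hnot : n ∉ pvReach cd c := hacyc n hn c (hch c hc)
          have hss : (pvReach cd c).toFinset ⊂ (pvReach cd n).toFinset := by
            constructor
            · intro z hz
              exact List.mem_toFinset.2 (hsub z (List.mem_toFinset.1 hz))
            · intro hcon
              exact hnot (List.mem_toFinset.1 (hcon (List.mem_toFinset.2 (pv_self_mem_reach cd n))))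
          have := Finset.card_lt_card hss
          omega
        have hfold : ∀ l : List Int, (∀ c ∈ l, c ∈ cs) → ∀ (p : PySem.Set Int × PvSt),
            ∃ q, List.foldlM (fun p c => pvVisitM cd ld d c p) p l = some q := by
          intro l
          induction l with
          | nil => intro _ p; exact ⟨p, rfl⟩
          | cons c l ihl =>
            intro hsubl p
            obtain ⟨V1, st1⟩ := p
            obtain ⟨q1, h1⟩ := ih c V1 st1 (hcR c (hsubl c (by simp))) (hcmu c (hsubl c (by simp)))
            obtain ⟨q, h2⟩ := ihl (fun c' hc' => hsubl c' (by simp [hc'])) q1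
            refine ⟨q, ?_⟩
            rw [List.foldlM_cons, h1]
            simpa using h2
        obtain ⟨q, hq⟩ := hfold cs.reverse (fun c hc => List.mem_reverse.1 hc) _
        refine ⟨(PySem.Set.add q.1 n, q.2), ?_⟩
        simp only [pvVisitM]
        rw [hcV]
        simp only [Bool.false_eq_true, if_false]
        rw [hg]
        simp only
        rw [hq]
        rfl

-- --- the invariant tying B's visited set to the accumulated dicts ---

def pvInv (cd ld : PySem.Dict Int (List Int)) (V : List Int) (st : PvSt) : Prop :=
  st.1.keys.Nodup ∧ st.2.keys.Nodup ∧
  (∀ m v, st.1.get? m = some v → cd.get? m = some v) ∧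
  (∀ m v, st.2.get? m = some v → ld.get? m = some v) ∧
  (∀ m ∈ V, ∃ cs, cd.get? m = some cs ∧ (cs ≠ [] → st.1.get? m = some cs) ∧
      (∀ ls, ld.get? m = some ls → ls ≠ [] → st.2.get? m = some ls)) ∧
  (∀ m ∈ V, ∀ y ∈ pvReach cd m, y ∈ V)

theorem pv_insert_idem (d : PySem.Dict Int (List Int)) (k : Int) (v : List Int)
    (hn : d.keys.Nodup) (h : d.get? k = some v) : d.insert k v = d := by
  apply PySem.Dict.ext
  rw [PySem.Dict.items_insert_of_contains d v
    (by rw [PySem.Dict.contains_eq_isSome_get?, h]; rfl)]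
  have : ∀ p ∈ d.items, (if (p.1 == k) = true then (k, v) else p) = p := by
    intro p hp
    by_cases hpk : p.1 = k
    · obtain ⟨p1, p2⟩ := p
      simp only at hpk
      subst hpk
      have := PySem.Dict.get?_of_mem_items d hp hn
      rw [h] at this
      simp [Option.some_inj.1 this]
    · simp [hpk]
  exact List.map_congr_left this |>.trans (List.map_id _)

-- a node already in V is a no-op for the non-memoized traversal
theorem pvNoop (cd ld : PySem.Dict Int (List Int)) (V : List Int) (st : PvSt)
    (hinv : pvInv cd ld V st) :
    ∀ (f : Nat) (n : Int), n ∈ V → ∀ out, pvVisitR cd ld f n st = some out → out = st := by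
  obtain ⟨nc, nl⟩ := st
  obtain ⟨hN1, hN2, _, _, hI, hC⟩ := hinv
  intro f
  induction f with
  | zero => intro n _ out h; simp [pvVisitR] at h
  | succ f ih =>
    intro n hn out h
    obtain ⟨cs, hg, h1, h2⟩ := hI n hn
    simp only [pvVisitR] at h
    rw [hg] at h
    simp only at h
    have hnc : (if cs ≠ [] then nc.insert n cs else nc) = nc := by
      by_cases hcs : cs = []
      · simp [hcs]
      · rw [if_pos hcs]
        exact pv_insert_idem nc n cs hN1 (h1 hcs)
    have hnl : (match ld.get? n with
        | some ls => if ls ≠ [] then nl.insert n ls else nl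
        | none => nl) = nl := by
      cases hld : ld.get? n with
      | none => rfl
      | some ls =>
        by_cases hls : ls = []
        · simp [hls]
        · simp only [hls, ne_eq, not_false_iff, if_true]
          exact pv_insert_idem nl n ls hN2 (h2 ls hld hls)
    rw [hnc, hnl] at h
    have hchV : ∀ c ∈ cs.reverse, c ∈ V := by
      intro c hc
      have : c ∈ pvChildren cd n := by simpa [pvChildren, hg] using List.mem_reverse.1 hc
      exact hC n hn c (pv_child_mem_reach cd n c this)
    -- fold of no-ops stays put
    have hfold : ∀ l, (∀ c ∈ l, c ∈ V) → ∀ out,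
        List.foldlM (fun st c => pvVisitR cd ld f c st) (nc, nl) l = some out → out = (nc, nl) := by
      intro l
      induction l with
      | nil => intro _ out h'; simpa using h'.symm
      | cons c l ihl =>
        intro hl out h'
        rw [List.foldlM_cons] at h'
        cases hv : pvVisitR cd ld f c (nc, nl) with
        | none => rw [hv] at h'; simp at h'
        | some mid =>
          rw [hv] at h'
          have : mid = (nc, nl) := ih c (hl c (by simp)) mid hv
          subst this
          exact ihl (fun c' hc' => hl c' (by simp [hc'])) out (by simpa using h')
    exact hfold cs.reverse hchV out h

-- --- memoized ⇒ non-memoized bisimulation ---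

-- fold version, parameterized by the node-level statement at fuel g
theorem pvBisimL (cd ld : PySem.Dict Int (List Int)) (g : Nat)
    (hK : ∀ (n : Int) (V : PySem.Set Int) (st : PvSt) (V' : PySem.Set Int) (st' : PvSt),
      pvInv cd ld V st → pvVisitM cd ld g n (V, st) = some (V', st') →
      pvInv cd ld V' st' ∧ (∀ m ∈ V, m ∈ V') ∧ n ∈ V' ∧
      (∀ k v, st.1.get? k = some v → st'.1.get? k = some v) ∧
      (∀ k v, st.2.get? k = some v → st'.2.get? k = some v) ∧
      (∀ f out, pvVisitR cd ld f n st = some out → out = st')) :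
    ∀ (l : List Int) (V : PySem.Set Int) (st : PvSt) (V' : PySem.Set Int) (st' : PvSt),
      pvInv cd ld V st →
      List.foldlM (fun p c => pvVisitM cd ld g c p) (V, st) l = some (V', st') →
      pvInv cd ld V' st' ∧ (∀ m ∈ V, m ∈ V') ∧ (∀ c ∈ l, c ∈ V') ∧
      (∀ k v, st.1.get? k = some v → st'.1.get? k = some v) ∧
      (∀ k v, st.2.get? k = some v → st'.2.get? k = some v) ∧
      (∀ f out, List.foldlM (fun st c => pvVisitR cd ld f c st) st l = some out → out = st') := by
  intro l
  induction l with
  | nil =>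
    intro V st V' st' hinv h
    simp [List.foldlM] at h
    obtain ⟨hV, hst⟩ := h
    subst hV; subst hst
    exact ⟨hinv, fun m hm => hm, by simp, fun k v h => h, fun k v h => h,
      fun f out h' => by simpa using h'.symm⟩
  | cons c l ihl =>
    intro V st V' st' hinv h
    rw [List.foldlM_cons] at h
    cases hv : pvVisitM cd ld g c (V, st) with
    | none => rw [hv] at h; simp at h
    | some p =>
      obtain ⟨V1, st1⟩ := p
      rw [hv] at h
      obtain ⟨hinv1, hVV1, hcV1, hp1, hp2, hR1⟩ := hK c V st V1 st1 hinv hv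
      obtain ⟨hinv', hV1V', hlV', hq1, hq2, hRl⟩ := ihl V1 st1 V' st' hinv1 (by simpa using h)
      refine ⟨hinv', fun m hm => hV1V' m (hVV1 m hm), ?_, ?_, ?_, ?_⟩
      · intro c' hc'
        rcases List.mem_cons.1 hc' with rfl | hc'
        · exact hV1V' c' hcV1
        · exact hlV' c' hc'
      · exact fun k v hkv => hq1 k v (hp1 k v hkv)
      · exact fun k v hkv => hq2 k v (hp2 k v hkv)
      · intro f out h'
        rw [List.foldlM_cons] at h'
        cases hv2 : pvVisitR cd ld f c st with
        | none => rw [hv2] at h'; simp at h'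
        | some mid =>
          rw [hv2] at h'
          have : mid = st1 := hR1 f mid hv2
          subst this
          exact hRl f out (by simpa using h')

theorem pvBisim (cd ld : PySem.Dict Int (List Int)) :
    ∀ (g : Nat) (n : Int) (V : PySem.Set Int) (st : PvSt) (V' : PySem.Set Int) (st' : PvSt),
      pvInv cd ld V st → pvVisitM cd ld g n (V, st) = some (V', st') →
      pvInv cd ld V' st' ∧ (∀ m ∈ V, m ∈ V') ∧ n ∈ V' ∧
      (∀ k v, st.1.get? k = some v → st'.1.get? k = some v) ∧
      (∀ k v, st.2.get? k = some v → st'.2.get? k = some v) ∧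
      (∀ f out, pvVisitR cd ld f n st = some out → out = st') := by
  intro g
  induction g with
  | zero => intro n V st V' st' _ h; simp [pvVisitM] at h
  | succ g ih =>
    intro n V st V' st' hinv h
    obtain ⟨nc, nl⟩ := st
    simp only [pvVisitM] at h
    cases hcV : PySem.Set.contains V n with
    | true =>
      rw [hcV] at h
      simp only [if_true] at h
      obtain ⟨hV, hst⟩ := Prod.mk.injEq .. ▸ (Option.some_inj.1 h)
      subst hV; subst hst
      have hnV : n ∈ V := by
        have : List.contains V n = true := hcV
        simpa using this
      exact ⟨hinv, fun m hm => hm, hnV, fun k v h => h, fun k v h => h,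
        fun f out h' => pvNoop cd ld V (nc, nl) hinv f n hnV out h'⟩
    | false =>
      rw [hcV] at h
      simp only [Bool.false_eq_true, if_false] at h
      have hnV : n ∉ V := by
        intro hmem
        have h2 : PySem.Set.contains V n = true := by
          simp only [PySem.Set.contains]
          simpa using hmem
        rw [hcV] at h2
        exact absurd h2 (by simp)
      cases hg : cd.get? n with
      | none => rw [hg] at h; simp at h
      | some cs =>
        rw [hg] at h
        simp only at h
        set nc1 := if cs ≠ [] then nc.insert n cs else nc with hnc1
        set nl1 := (match ld.get? n with
          | some ls => if ls ≠ [] then nl.insert n ls else nl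
          | none => nl) with hnl1
        obtain ⟨hN1, hN2, hJ1, hJ2, hI, hC⟩ := hinv
        -- invariant after the two inserts
        have hget1 : ∀ k v, nc.get? k = some v → nc1.get? k = some v := by
          intro k v hkv
          rw [hnc1]
          by_cases hcs : cs = []
          · simpa [hcs] using hkv
          · rw [if_pos hcs, PySem.Dict.get?_insert]
            by_cases hk : k = n
            · subst hk
              have := hJ1 k v hkv
              rw [hg] at this
              simp [Option.some_inj.1 this]
            · rw [if_neg hk]; exact hkv
        have hget2 : ∀ k v, nl.get? k = some v → nl1.get? k = some v := by
          intro k v hkv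
          rw [hnl1]
          cases hld : ld.get? n with
          | none => exact hkv
          | some ls =>
            by_cases hls : ls = []
            · simpa [hls] using hkv
            · simp only [hls, ne_eq, not_false_iff, if_true]
              rw [PySem.Dict.get?_insert]
              by_cases hk : k = n
              · subst hk
                have := hJ2 k v hkv
                rw [hld] at this
                simp [Option.some_inj.1 this]
              · rw [if_neg hk]; exact hkv
        have hcs1 : cs ≠ [] → nc1.get? n = some cs := by
          intro hcs
          rw [hnc1, if_pos hcs]
          exact PySem.Dict.get?_insert_self nc n cs
        have hls1 : ∀ ls, ld.get? n = some ls → ls ≠ [] → nl1.get? n = some ls := by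
          intro ls hld hls
          rw [hnl1, hld]
          simp only [hls, ne_eq, not_false_iff, if_true]
          exact PySem.Dict.get?_insert_self nl n ls
        have hinv1 : pvInv cd ld V (nc1, nl1) := by
          refine ⟨?_, ?_, ?_, ?_, ?_, hC⟩
          · rw [hnc1]; by_cases hcs : cs = [] <;>
              simp only [hcs, ne_eq, not_true_eq_false, if_false, not_false_iff, if_true]
            · exact hN1
            · exact PySem.Dict.nodup_keys_insert nc n cs hN1
          · rw [hnl1]
            cases hld : ld.get? n with
            | none => exact hN2
            | some ls =>
              by_cases hls : ls = []
              · simpa [hls] using hN2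
              · simp only [hls, ne_eq, not_false_iff, if_true]
                exact PySem.Dict.nodup_keys_insert nl n ls hN2
          · intro m v hmv
            rw [hnc1] at hmv
            by_cases hcs : cs = []
            · exact hJ1 m v (by simpa [hcs] using hmv)
            · rw [if_pos hcs, PySem.Dict.get?_insert] at hmv
              by_cases hm : m = n
              · subst hm; rw [if_pos rfl] at hmv
                rw [hg, hmv]
              · rw [if_neg hm] at hmv; exact hJ1 m v hmv
          · intro m v hmv
            rw [hnl1] at hmv
            cases hld : ld.get? n with
            | none => rw [hld] at hmv; exact hJ2 m v hmv
            | some ls =>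
              rw [hld] at hmv
              by_cases hls : ls = []
              · exact hJ2 m v (by simpa [hls] using hmv)
              · simp only [hls, ne_eq, not_false_iff, if_true] at hmv
                rw [PySem.Dict.get?_insert] at hmv
                by_cases hm : m = n
                · subst hm; rw [if_pos rfl] at hmv; rw [hld, hmv]
                · rw [if_neg hm] at hmv; exact hJ2 m v hmv
          · intro m hm
            obtain ⟨cs', hg', h1', h2'⟩ := hI m hm
            exact ⟨cs', hg', fun hne => hget1 m cs' (h1' hne), fun ls hld hls => hget2 m ls (h2' ls hld hls)⟩
        -- run the fold
        cases hfold : List.foldlM (fun p c => pvVisitM cd ld g c p) (V, (nc1, nl1)) cs.reverse with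
        | none => rw [hfold] at h; simp at h
        | some q =>
          obtain ⟨V2, st2⟩ := q
          rw [hfold] at h
          simp only [Option.map_some] at h
          obtain ⟨hV', hst'⟩ := Prod.mk.injEq .. ▸ (Option.some_inj.1 h)
          obtain ⟨hinv2, hVV2, hlV2, hq1, hq2, hRl⟩ :=
            pvBisimL cd ld g ih cs.reverse V (nc1, nl1) V2 st2 hinv1 hfold
          have hmem_add : ∀ x, x ∈ PySem.Set.add V2 n ↔ x ∈ V2 ∨ x = n := by
            intro x; exact PySem.Set.mem_add V2 n x
          have hV2sub : ∀ x ∈ V2, x ∈ PySem.Set.add V2 n := fun x hx => (hmem_add x).2 (Or.inl hx)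
          have hchV2 : ∀ c ∈ cs, c ∈ V2 := fun c hc => hlV2 c (List.mem_reverse.2 hc)
          obtain ⟨hN1', hN2', hJ1', hJ2', hI', hC'⟩ := hinv2
          have hinvFinal : pvInv cd ld (PySem.Set.add V2 n) st2 := by
            refine ⟨hN1', hN2', hJ1', hJ2', ?_, ?_⟩
            · intro m hm
              rcases (hmem_add m).1 hm with hm2 | rfl
              · exact hI' m hm2
              · exact ⟨cs, hg, fun hne => hq1 m cs (hcs1 hne),
                  fun ls hld hls => hq2 m ls (hls1 ls hld hls)⟩
            · intro m hm y hy
              rcases (hmem_add m).1 hm with hm2 | rfl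
              · exact hV2sub y (hC' m hm2 y hy)
              · rcases pv_reach_decomp cd m y hy with rfl | ⟨c, hcc, hyc⟩
                · exact (hmem_add y).2 (Or.inr rfl)
                · have hccs : c ∈ cs := by simpa [pvChildren, hg] using hcc
                  exact hV2sub y (hC' c (hchV2 c hccs) y hyc)
          subst hV'; subst hst'
          refine ⟨hinvFinal, ?_, (hmem_add n).2 (Or.inr rfl), ?_, ?_, ?_⟩
          · exact fun m hm => hV2sub m (hVV2 m hm)
          · exact fun k v hkv => hq1 k v (hget1 k v hkv)
          · exact fun k v hkv => hq2 k v (hget2 k v hkv)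
          · intro f out h'
            cases f with
            | zero => simp [pvVisitR] at h'
            | succ f =>
              simp only [pvVisitR] at h'
              rw [hg] at h'
              simp only at h'
              exact hRl f out h'

-- ===== VERDICT (by name: the statement is the Claim_ definition above) =====
theorem simplify_tree_info_spec : Claim_equal_simplify_tree_info := by
  intro ci li root _hdom hpre
  obtain ⟨hclosed, hacyc⟩ := hpre
  unfold Spec_simplify_tree_info
  have h0R : (0 : Int) ∈ pvReach (PySem.Dict.mk ci) 0 := pv_self_mem_reach _ 0
  have hsub : (pvReach (PySem.Dict.mk ci) 0).toFinset ⊆ ((PySem.Dict.mk ci).keys).toFinset := by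
    intro y hy
    have hk := hclosed y (List.mem_toFinset.1 hy)
    cases hq : (PySem.Dict.mk ci).get? y with
    | none => rw [hq] at hk; simp at hk
    | some v =>
      exact List.mem_toFinset.2
        (PySem.Dict.mem_keys_of_mem_items _
          (PySem.Dict.mem_items_of_get?_eq_some (d := PySem.Dict.mk ci) hq))
  have hcard : (pvReach (PySem.Dict.mk ci) 0).toFinset.card ≤ ci.length := by
    have h1 := Finset.card_le_card hsub
    have h2 := List.toFinset_card_le ((PySem.Dict.mk ci).keys)
    have h3 : ((PySem.Dict.mk ci).keys).length = ci.length := by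
      simp [PySem.Dict.keys]
    omega
  -- initial invariant (empty visited set, empty dicts)
  have hinv0 : pvInv (PySem.Dict.mk ci) (PySem.Dict.mk li) PySem.Set.empty
      (PySem.Dict.mk [], PySem.Dict.mk []) := by
    refine ⟨by simp [PySem.Dict.keys], by simp [PySem.Dict.keys], ?_, ?_, ?_, ?_⟩
    · intro m v hmv; exact absurd hmv (by simp [PySem.Dict.get?])
    · intro m v hmv; exact absurd hmv (by simp [PySem.Dict.get?])
    · intro m hm; exact absurd hm (by simp [PySem.Set.empty])
    · intro m hm; exact absurd hm (by simp [PySem.Set.empty])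
  -- B terminates
  obtain ⟨q, hB⟩ := pvTM (PySem.Dict.mk ci) (PySem.Dict.mk li) hclosed hacyc
    (ci.length + 1) 0 PySem.Set.empty (PySem.Dict.mk [], PySem.Dict.mk []) h0R (by omega)
  obtain ⟨V', st'⟩ := q
  -- the non-memoized recursion terminates
  obtain ⟨out, hR⟩ := pvT (PySem.Dict.mk ci) (PySem.Dict.mk li) hclosed hacyc
    (ci.length + 1) 0 (PySem.Dict.mk [], PySem.Dict.mk []) h0R (by omega)
  -- bisimulation: the recursion computes B's state
  obtain ⟨_, _, _, _, _, hRB⟩ := pvBisim (PySem.Dict.mk ci) (PySem.Dict.mk li)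
    (ci.length + 1) 0 PySem.Set.empty (PySem.Dict.mk [], PySem.Dict.mk []) V' st' hinv0 hB
  have hout : out = st' := hRB _ out hR
  subst hout
  -- the recursion is matched by A's stack loop (pvK), then pumped to A's fuel (mono)
  obtain ⟨c, hc, hA⟩ := pvK (PySem.Dict.mk ci) (PySem.Dict.mk li) (ci.length + 1) 0 _ out hR
  have hA2 := pvRunA_mono (PySem.Dict.mk ci) (PySem.Dict.mk li) c [0] _ out 0
    (pvW (PySem.Dict.mk ci) (ci.length + 1) 0 - c) hA
  rw [show c + (pvW (PySem.Dict.mk ci) (ci.length + 1) 0 - c)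
        = pvW (PySem.Dict.mk ci) (ci.length + 1) 0 by omega] at hA2
  obtain ⟨onc, onl⟩ := out
  show simplify_tree_info ci li root = simplify_tree_info_alt ci li root
  unfold simplify_tree_info simplify_tree_info_alt
  simp only [hB, hA2]
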